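-- pv_equiv track=rewrite | github.com/limitz/glitchkin | output/tools/LTG_TOOL_char_diff.py | find_figure_span
-- ===== SOURCE A (Python) =====
-- MIN_ROW_DENSITY = 0.04       # fraction of bbox width that must be foreground
--
-- def find_figure_span(row_counts: list, img_width: int) -> tuple:
--     """
--     Find the topmost and bottommost rows with meaningful foreground content.
--     Returns (top_row, bottom_row) inclusive, or (None, None) if not found.
--     """
--     threshold = max(1, int(img_width * MIN_ROW_DENSITY))
--     top = None
--     bottom = None
--     for y, count in enumerate(row_counts):
--         if count >= threshold:
--             if top is None:
--                 top = y
--             bottom = y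
--     return top, bottom
-- ===== SOURCE B (Python) =====
-- MIN_ROW_DENSITY = 0.04
--
-- def find_figure_span(row_counts: list, img_width: int) -> tuple:
--     """Two independent searches: forward for the first dense row, backward for the last."""
--     threshold = max(1, int(img_width * MIN_ROW_DENSITY))
--     top = next((y for y, c in enumerate(row_counts) if c >= threshold), None)
--     bottom = next((y for y in range(len(row_counts) - 1, -1, -1)
--                    if row_counts[y] >= threshold), None)
--     return top, bottom
-- ===== Notes on version B (the rewrite author's own statement) =====
-- stated objective: alternative
-- what changed: Replaces A's single accumulating pass (mutable top/bottom state) with two independent first-match searches: a forward scan for top and a backward scan (early exit) for bottom.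
import Mathlib
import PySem

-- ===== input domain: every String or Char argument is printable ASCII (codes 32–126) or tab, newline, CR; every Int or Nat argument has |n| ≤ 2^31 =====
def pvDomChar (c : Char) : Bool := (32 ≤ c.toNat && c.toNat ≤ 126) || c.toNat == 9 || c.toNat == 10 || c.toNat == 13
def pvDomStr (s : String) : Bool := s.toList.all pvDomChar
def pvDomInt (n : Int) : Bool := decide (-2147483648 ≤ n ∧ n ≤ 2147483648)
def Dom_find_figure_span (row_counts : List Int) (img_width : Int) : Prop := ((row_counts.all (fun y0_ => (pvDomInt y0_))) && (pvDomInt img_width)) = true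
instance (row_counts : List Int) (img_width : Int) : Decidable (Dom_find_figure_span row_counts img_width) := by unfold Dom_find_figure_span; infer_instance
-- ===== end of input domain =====

-- B changes the decomposition: one accumulating pass becomes two independent first-match
-- searches (forward for top, backward for bottom); objective: alternative (same cost).

-- ===== PORT A =====
-- `max(1, int(img_width * 0.04))`: 0.04 is the double slightly above 1/25, and for
-- |img_width| ≤ 2^31 the truncated product equals sign(w)·(|w|//25); this integer form is
-- exact on the stated domain (floats have no PySem port).
def pyThreshold (img_width : Int) : Int :=
  max 1 (if img_width ≥ 0 then PySem.Int.floordiv img_width 25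
         else -(PySem.Int.floordiv (-img_width) 25))

-- the loop: (top, bottom) accumulator over enumerate(row_counts)
def fsLoopA (t : Int) : List Int → Int → Option Int × Option Int → Option Int × Option Int
  | [], _, st => st
  | c :: rest, y, (top, bottom) =>
    fsLoopA t rest (y + 1)
      (if c ≥ t then (if top = none then some y else top, some y) else (top, bottom))

def find_figure_span (row_counts : List Int) (img_width : Int) : Option Int × Option Int :=
  fsLoopA (pyThreshold img_width) row_counts 0 (none, none)

-- ===== PORT B =====
-- forward generator: first index y with c ≥ threshold
def fsAltTop (t : Int) : List Int → Int → Option Int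
  | [], _ => none
  | c :: rest, y => if c ≥ t then some y else fsAltTop t rest (y + 1)

-- backward generator `range(len-1, -1, -1)`: walk the reversed list with the index
-- counting down, first hit wins
def fsAltBottom (t : Int) : List Int → Int → Option Int
  | [], _ => none
  | c :: rest, y => if c ≥ t then some y else fsAltBottom t rest (y - 1)

def find_figure_span_alt (row_counts : List Int) (img_width : Int) : Option Int × Option Int :=
  let t := pyThreshold img_width
  (fsAltTop t row_counts 0,
   fsAltBottom t row_counts.reverse ((row_counts.length : Int) - 1))

-- ===== PRECONDITION & SPEC =====
def Spec_find_figure_span (row_counts : List Int) (img_width : Int) (out : Option Int × Option Int) : Prop := out = find_figure_span_alt row_counts img_width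
instance (row_counts : List Int) (img_width : Int) (out : Option Int × Option Int) : Decidable (Spec_find_figure_span row_counts img_width out) := by unfold Spec_find_figure_span; infer_instance

-- ===== CLAIM (what is proved, stated in full; the proofs are below) =====
def Claim_equal_find_figure_span : Prop := ∀ (row_counts : List Int) (img_width : Int), Dom_find_figure_span row_counts img_width → Spec_find_figure_span row_counts img_width (find_figure_span row_counts img_width)

-- ===== LEMMAS AND PROOFS =====

-- last matching index of rc, indices starting at y (proof-side reference)
def fsLast (t : Int) : List Int → Int → Option Int
  | [], _ => none
  | c :: rest, y =>
    match fsLast t rest (y + 1) with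
    | some z => some z
    | none => if c ≥ t then some y else none

theorem fsLoopA_eq (t : Int) (rc : List Int) :
    ∀ (y : Int) (top bottom : Option Int),
      fsLoopA t rc y (top, bottom) =
        ((match top with | some z => some z | none => fsAltTop t rc y),
         (match fsLast t rc y with | some z => some z | none => bottom)) := by
  induction rc with
  | nil => intro y top bottom; cases top <;> simp [fsLoopA, fsAltTop, fsLast]
  | cons c rest ih =>
    intro y top bottom
    simp only [fsLoopA, fsAltTop, fsLast]
    by_cases h : c ≥ t
    · simp only [h, if_pos]
      rw [ih]
      cases top <;> cases fsLast t rest (y + 1) <;> simp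
    · simp only [h, if_neg, if_false]
      rw [ih]
      cases fsLast t rest (y + 1) <;> simp [h]

theorem fsAltBottom_append (t : Int) (l1 l2 : List Int) :
    ∀ y : Int,
      fsAltBottom t (l1 ++ l2) y =
        match fsAltBottom t l1 y with
        | some z => some z
        | none => fsAltBottom t l2 (y - l1.length) := by
  induction l1 with
  | nil => intro y; simp [fsAltBottom]
  | cons c rest ih =>
    intro y
    simp only [List.cons_append, fsAltBottom]
    by_cases h : c ≥ t
    · simp [h]
    · simp only [h, if_false]
      rw [ih]
      have : y - 1 - (rest.length : Int) = y - ((c :: rest).length : Int) := by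
        simp; omega
      rw [this]

theorem fsAltBottom_reverse (t : Int) (rc : List Int) :
    ∀ y : Int,
      fsAltBottom t rc.reverse (y + (rc.length : Int) - 1) = fsLast t rc y := by
  induction rc with
  | nil => intro y; simp [fsAltBottom, fsLast]
  | cons c rest ih =>
    intro y
    simp only [List.reverse_cons, fsLast]
    rw [fsAltBottom_append]
    have h1 : y + ((c :: rest).length : Int) - 1 = (y + 1) + (rest.length : Int) - 1 := by
      simp; omega
    rw [h1, ih]
    have h2 : (y + 1) + (rest.length : Int) - 1 - ((rest.reverse).length : Int) = y := by
      simp; omega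
    rw [h2]
    cases fsLast t rest (y + 1) <;> simp [fsAltBottom]

-- ===== VERDICT (by name: the statement is the Claim_ definition above) =====
theorem find_figure_span_spec : Claim_equal_find_figure_span := by
  intro rc w _
  unfold Spec_find_figure_span find_figure_span find_figure_span_alt
  rw [fsLoopA_eq]
  show _ = (fsAltTop (pyThreshold w) rc 0,
            fsAltBottom (pyThreshold w) rc.reverse ((rc.length : Int) - 1))
  rw [show (rc.length : Int) - 1 = 0 + (rc.length : Int) - 1 by omega, fsAltBottom_reverse]
  cases fsLast (pyThreshold w) rc 0 <;> simp
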